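-- pv_equiv track=rewrite | github.com/abhianshi/Natural-Language-Processing | Text Similarity Analysis/Text_Similarity_Analysis.py | start_alphanumeric_normalize
-- ===== SOURCE A (Python) =====
-- def isAlphaNumeric(character):
--     # Checking only lowercase letters because in first step of normalization, we are converting all the uppercase letters to lowercase letters
--     if((character >= 'a' and character <= 'z') or (character >= '0' and character <= '9')):
--         return True
--     else:
--         return False
--
-- def isSpecialCase(word):
--     for i in range(len(word)):
--         if(isAlphaNumeric(word[i])):
--             return False
--
--     return True
--
-- def start_alphanumeric_normalize(tokens_list):
--     length = len(tokens_list)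
--     shift = 0
--
--     for i in range(length):
--         j = 0
--         index = i + shift
--         word = tokens_list[index]
--
--         if(not isSpecialCase(word) and not isAlphaNumeric(word[j])):
--
--             while(j < len(word) and not isAlphaNumeric(word[j]) ):
--                 tokens_list.insert(index + j, str(word[j]))
--                 j += 1
--                 shift += 1
--
--             if(j != len(word)):
--                 tokens_list[i + shift] = word[j:]
--
--     return tokens_list
-- ===== SOURCE B (Python) =====
-- def start_alphanumeric_normalize(tokens_list):
--     def is_alnum(c):
--         return 'a' <= c <= 'z' or '0' <= c <= '9'
--
--     def split_token(word):
--         k = next((i for i, c in enumerate(word) if is_alnum(c)), None)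
--         if k is None or k == 0:
--             return [word]
--         return list(word[:k]) + [word[k:]]
--
--     result = [piece for word in tokens_list for piece in split_token(word)]
--     tokens_list[:] = result
--     return tokens_list
-- ===== Notes on version B (the rewrite author's own statement) =====
-- stated objective: simpler
-- what changed: Replaces A's in-place insert+shift index bookkeeping and char-by-char peeling while-loop with a pure split_token helper (find first lowercase-alnum index with one search, slice there) flattened over the tokens in a single comprehension; the result is slice-assigned back so the list is mutated in place like A.
import Mathlib
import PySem

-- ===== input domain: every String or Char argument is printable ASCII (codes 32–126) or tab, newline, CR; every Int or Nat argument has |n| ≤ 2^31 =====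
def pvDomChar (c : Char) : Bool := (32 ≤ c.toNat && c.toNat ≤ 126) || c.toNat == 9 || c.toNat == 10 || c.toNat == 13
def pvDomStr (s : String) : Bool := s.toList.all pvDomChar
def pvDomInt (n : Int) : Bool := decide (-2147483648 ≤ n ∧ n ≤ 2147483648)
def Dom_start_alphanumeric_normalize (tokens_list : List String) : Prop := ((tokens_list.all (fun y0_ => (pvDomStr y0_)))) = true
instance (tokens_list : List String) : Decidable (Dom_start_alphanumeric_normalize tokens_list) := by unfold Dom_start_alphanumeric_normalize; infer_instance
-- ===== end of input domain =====

-- B replaces A's in-place insert+shift bookkeeping and char-peeling while-loop with a pure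
-- split-at-first-alnum-index helper and one flatten pass (objective: simpler). Both Pythons
-- mutate tokens_list in place to the same final contents; the equivalence proved here is about
-- the returned value.

-- ===== PORT A =====
def isAlphaNumericA (character : Char) : Bool :=
  if (('a' ≤ character && character ≤ 'z') || ('0' ≤ character && character ≤ '9')) then true
  else false

-- for-loop with early return over the word's characters
def isSpecialCaseA : List Char → Bool
  | [] => true
  | c :: rest => if isAlphaNumericA c then false else isSpecialCaseA rest

-- the inner while-loop: state (tokens_list, j, shift); rest = word[j:] as chars
def whileA : List String → Nat → List Char → Nat → Nat → List String × Nat × Nat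
  | lst, _, [], j, shift => (lst, j, shift)
  | lst, index, c :: rest, j, shift =>
    if !isAlphaNumericA c then
      whileA (lst.insertIdx (index + j) (String.ofList [c])) index rest (j + 1) (shift + 1)
    else (lst, j, shift)

-- one iteration of the for-loop body (word[0] read as headD; the read is guarded by
-- isSpecialCase exactly as in the Python, so the default is never the decisive value)
def stepA (st : List String × Nat) (i : Nat) : List String × Nat :=
  let lst := st.1
  let shift := st.2
  let index := i + shift
  let word := lst.getD index ""
  if !isSpecialCaseA word.toList && !isAlphaNumericA (word.toList.headD ' ') then
    let r := whileA lst index word.toList 0 shift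
    if r.2.1 ≠ word.toList.length then
      (r.1.set (i + r.2.2) (String.ofList (word.toList.drop r.2.1)), r.2.2)
    else (r.1, r.2.2)
  else st

def start_alphanumeric_normalize (tokens_list : List String) : List String :=
  ((List.range tokens_list.length).foldl stepA (tokens_list, 0)).1

-- ===== PORT B =====
def isAlnumB (c : Char) : Bool := ('a' ≤ c && c ≤ 'z') || ('0' ≤ c && c ≤ '9')

-- split_token: first alnum index via a single search, then slice
def splitTokB (word : String) : List String :=
  match word.toList.findIdx? isAlnumB with
  | none => [word]
  | some k =>
    if k = 0 then [word]
    else (word.toList.take k).map (fun c => String.ofList [c]) ++ [String.ofList (word.toList.drop k)]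

def start_alphanumeric_normalize_alt (tokens_list : List String) : List String :=
  tokens_list.flatMap splitTokB

-- ===== PRECONDITION & SPEC =====
def Spec_start_alphanumeric_normalize (tokens_list : List String) (out : List String) : Prop := out = start_alphanumeric_normalize_alt tokens_list
instance (tokens_list : List String) (out : List String) : Decidable (Spec_start_alphanumeric_normalize tokens_list out) := by unfold Spec_start_alphanumeric_normalize; infer_instance

-- ===== CLAIM (what is proved, stated in full; the proofs are below) =====
def Claim_equal_start_alphanumeric_normalize : Prop := ∀ (tokens_list : List String), Dom_start_alphanumeric_normalize tokens_list → Spec_start_alphanumeric_normalize tokens_list (start_alphanumeric_normalize tokens_list)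

-- ===== LEMMAS AND PROOFS =====

theorem alnum_eq (c : Char) : isAlphaNumericA c = isAlnumB c := by
  simp [isAlphaNumericA, isAlnumB]

theorem special_eq (cs : List Char) : isSpecialCaseA cs = cs.all (fun c => !isAlnumB c) := by
  induction cs with
  | nil => rfl
  | cons c rest ih =>
    simp only [isSpecialCaseA, alnum_eq, List.all_cons]
    cases h : isAlnumB c <;> simp [h, ih]

theorem getD_at_len (P : List String) (w : String) (Q : List String) :
    (P ++ w :: Q).getD P.length "" = w := by
  induction P with
  | nil => rfl
  | cons p ps ih => simpa using ih

theorem insertIdx_at_len {α : Type} (P Q : List α) (x : α) :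
    (P ++ Q).insertIdx P.length x = P ++ x :: Q := by
  induction P with
  | nil => rfl
  | cons p ps ih => simpa [List.insertIdx] using ih

theorem set_at_len {α : Type} (P : List α) (y : α) (Q : List α) (x : α) :
    (P ++ y :: Q).set P.length x = P ++ x :: Q := by
  induction P with
  | nil => rfl
  | cons p ps ih => simpa using ih

theorem whileA_spec (rest : List Char) : ∀ (P Q : List String) (index j sh : Nat),
    P.length = index + j →
    whileA (P ++ Q) index rest j sh =
      (P ++ (rest.takeWhile (fun c => !isAlnumB c)).map (fun c => String.ofList [c]) ++ Q,
       j + (rest.takeWhile (fun c => !isAlnumB c)).length,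
       sh + (rest.takeWhile (fun c => !isAlnumB c)).length) := by
  induction rest with
  | nil => intro P Q index j sh _; simp [whileA]
  | cons c rs ih =>
    intro P Q index j sh hP
    cases h : isAlnumB c with
    | false =>
      have : whileA (P ++ Q) index (c :: rs) j sh =
          whileA ((P ++ Q).insertIdx (index + j) (String.ofList [c])) index rs (j + 1) (sh + 1) := by
        simp [whileA, alnum_eq, h]
      rw [this, ← hP, insertIdx_at_len]
      have := ih (P ++ [String.ofList [c]]) Q index (j + 1) (sh + 1) (by simp [hP]; omega)
      simp only [List.append_assoc, List.singleton_append] at this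
      rw [this]
      simp [List.takeWhile_cons, h]
      constructor
      · omega
      · omega
    | true =>
      simp [whileA, alnum_eq, h, List.takeWhile_cons]

theorem splitTokB_len (w : String) : 1 ≤ (splitTokB w).length := by
  unfold splitTokB
  cases h : w.toList.findIdx? isAlnumB with
  | none => simp
  | some k => by_cases hk : k = 0 <;> simp [hk]

theorem flat_ge (l : List String) : l.length ≤ (l.flatMap splitTokB).length := by
  induction l with
  | nil => simp
  | cons w ws ih =>
    have := splitTokB_len w
    simp only [List.flatMap_cons, List.length_append, List.length_cons]
    omega

theorem findIdx?_split {α : Type} (p : α → Bool) (l : List α) (h : ∃ x ∈ l, p x = true) :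
    l.findIdx? p = some (l.takeWhile (fun c => !p c)).length ∧
    l.take (l.takeWhile (fun c => !p c)).length = l.takeWhile (fun c => !p c) ∧
    l.drop (l.takeWhile (fun c => !p c)).length = l.dropWhile (fun c => !p c) := by
  induction l with
  | nil => simp at h
  | cons c rs ih =>
    cases hc : p c with
    | true => simp [List.findIdx?_cons, hc, List.takeWhile_cons, List.dropWhile_cons]
    | false =>
      have h' : ∃ x ∈ rs, p x = true := by
        rcases h with ⟨x, hx, hpx⟩
        rcases List.mem_cons.mp hx with rfl | hx'
        · rw [hc] at hpx; exact absurd hpx (by simp)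
        · exact ⟨x, hx', hpx⟩
      obtain ⟨h1, h2, h3⟩ := ih h'
      refine ⟨?_, ?_, ?_⟩
      · simp [List.findIdx?_cons, hc, List.takeWhile_cons, h1]
      · simp [List.takeWhile_cons, hc, h2]
      · simp [List.takeWhile_cons, List.dropWhile_cons, hc, h3]

theorem step_spec (word : String) (pre rs : List String) (i sh : Nat)
    (hpre : pre.length = i + sh) :
    stepA (pre ++ word :: rs, sh) i = (pre ++ splitTokB word ++ rs, sh + ((splitTokB word).length - 1)) := by
  have hget : (pre ++ word :: rs).getD (i + sh) "" = word := by
    rw [← hpre]; exact getD_at_len pre word rs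
  cases hsp : isSpecialCaseA word.toList with
  | true =>
    -- no alnum char: token unchanged
    have hall : ∀ c ∈ word.toList, isAlnumB c = false := by
      rw [special_eq] at hsp
      intro c hc
      simpa using List.all_eq_true.mp hsp c hc
    have hfind : word.toList.findIdx? isAlnumB = none := List.findIdx?_eq_none_iff.mpr hall
    have hsplit : splitTokB word = [word] := by unfold splitTokB; rw [hfind]
    have hid : stepA (pre ++ word :: rs, sh) i = (pre ++ word :: rs, sh) := by
      simp only [stepA]
      rw [hget, hsp]
      simp
    rw [hid, hsplit]
    simp
  | false =>
    have hne : word.toList ≠ [] := by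
      intro h; rw [h] at hsp; simp [isSpecialCaseA] at hsp
    obtain ⟨c, cs, hcs⟩ := List.exists_cons_of_ne_nil hne
    cases hc : isAlnumB c with
    | true =>
      -- starts alphanumeric: token unchanged
      have hsplit : splitTokB word = [word] := by
        unfold splitTokB
        rw [hcs, List.findIdx?_cons, hc]
        simp
      have hhead : isAlphaNumericA (word.toList.headD ' ') = true := by
        rw [hcs]; simpa [alnum_eq] using hc
      have hid : stepA (pre ++ word :: rs, sh) i = (pre ++ word :: rs, sh) := by
        simp only [stepA]
        rw [hget, hsp, hhead]
        simp
      rw [hid, hsplit]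
      simp
    | false =>
      -- leading non-alnum chars are peeled off one by one
      have hex : ∃ x ∈ word.toList, isAlnumB x = true := by
        by_contra hno
        push_neg at hno
        have hall : isSpecialCaseA word.toList = true := by
          rw [special_eq]
          exact List.all_eq_true.mpr (fun x hx => by
            have hx' := hno x hx
            simp only [Bool.not_eq_true] at hx'
            simp [hx'])
        rw [hall] at hsp
        simp at hsp
      obtain ⟨hfind, htake, hdrop⟩ := findIdx?_split isAlnumB word.toList hex
      set t := word.toList.takeWhile (fun c => !isAlnumB c) with ht
      have htlen_pos : 0 < t.length := by
        rw [ht, hcs, List.takeWhile_cons, hc]; simp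
      have htlen_lt : t.length < word.toList.length := by
        have hpref := List.takeWhile_prefix (l := word.toList) (p := fun c => !isAlnumB c)
        have hle : t.length ≤ word.toList.length := hpref.length_le
        rcases Nat.lt_or_ge t.length word.toList.length with h | h
        · exact h
        · exfalso
          have heq : t = word.toList := List.IsPrefix.eq_of_length hpref (Nat.le_antisymm hle h)
          rcases hex with ⟨x, hx, hpx⟩
          have hxt : x ∈ t := heq ▸ hx
          have := List.mem_takeWhile_imp hxt
          simp [hpx] at this
      have hhead : isAlphaNumericA (word.toList.headD ' ') = false := by
        rw [hcs]; simpa [alnum_eq] using hc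
      have hw := whileA_spec word.toList pre (word :: rs) (i + sh) 0 sh (by omega)
      have hsplit : splitTokB word =
          t.map (fun c => String.ofList [c]) ++ [String.ofList (word.toList.drop t.length)] := by
        unfold splitTokB
        rw [hfind]
        have hz : ¬ t.length = 0 := by omega
        simp only [hz, if_false, htake, ← ht]
      have hj : 0 + t.length ≠ word.toList.length := by omega
      simp only [stepA]
      rw [hget, hsp, hhead]
      simp only [Bool.not_false, Bool.and_self, if_true, if_pos]
      rw [hw]
      simp only [← ht, Nat.zero_add, ne_eq]
      split_ifs with hif
      · exact absurd hif (by omega)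
      · have hpos : i + (sh + t.length) = (pre ++ t.map (fun c => String.ofList [c])).length := by
          simp; omega
        rw [hpos, set_at_len, hsplit]
        simp only [Prod.mk.injEq, ← List.append_assoc]
        exact ⟨by simp, by simp⟩

theorem fold_spec (suffix : List String) : ∀ (pre : List String) (i sh : Nat),
    pre.length = i + sh →
    (List.range' i suffix.length).foldl stepA (pre ++ suffix, sh) =
      (pre ++ suffix.flatMap splitTokB, sh + ((suffix.flatMap splitTokB).length - suffix.length)) := by
  induction suffix with
  | nil => intro pre i sh _; simp
  | cons w ws ih =>
    intro pre i sh hpre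
    have hwlen := splitTokB_len w
    have hflat := flat_ge ws
    rw [List.length_cons, List.range'_succ, List.foldl_cons, step_spec w pre ws i sh hpre]
    have := ih (pre ++ splitTokB w) (i + 1) (sh + ((splitTokB w).length - 1))
      (by simp; omega)
    rw [this]
    simp only [List.flatMap_cons, Prod.mk.injEq, ← List.append_assoc, List.length_append,
      List.length_cons]
    exact ⟨trivial, by omega⟩

-- ===== VERDICT (by name: the statement is the Claim_ definition above) =====
theorem start_alphanumeric_normalize_spec : Claim_equal_start_alphanumeric_normalize := by
  intro tokens_list _
  show _ = _
  unfold start_alphanumeric_normalize start_alphanumeric_normalize_alt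
  rw [List.range_eq_range']
  have := fold_spec tokens_list [] 0 0 rfl
  simpa using congrArg Prod.fst this
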